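-- pv_equiv track=rewrite | github.com/Sallyrideauto/codetree-TILs | 240501/겹치지 않는 선분 2/line-segments-that-do-not-overlap-2.py | max_non_overlapping_segments
-- ===== SOURCE A (Python) =====
-- from itertools import combinations
--
-- def is_intersecting(p1, q1, p2, q2):
--     # 두 점이 주어졌을 때, 세 번째 점이 선분 위에 있는지 확인하는 함수
--     def on_segment(p, q, r):
--         return min(p[0], r[0]) <= q[0] <= max(p[0], r[0]) and min(p[1], r[1]) <= q[1] <= max(p[1], r[1])
--
--     # 세 점의 방향성을 결정하는 함수
--     def orientation(p, q, r):
--         val = (q[1] - p[1]) * (r[0] - q[0]) - (q[0] - p[0]) * (r[1] - q[1])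
--         if val == 0:
--             return 0  # collinear
--         elif val > 0:
--             return 1  # clockwise
--         else:
--             return -1  # counter-clockwise
--
--     # 방향성을 통해 교차 여부를 확인
--     o1 = orientation(p1, q1, p2)
--     o2 = orientation(p1, q1, q2)
--     o3 = orientation(p2, q2, p1)
--     o4 = orientation(p2, q2, q1)
--
--     # 일반적인 교차 조건
--     if o1 != o2 and o3 != o4:
--         return True
--     # 특수한 경우: 콜리니어하고 선분 위에 있는 경우
--     if o1 == 0 and on_segment(p1, p2, q1):
--         return True
--     if o2 == 0 and on_segment(p1, q2, q1):
--         return True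
--     if o3 == 0 and on_segment(p2, p1, q2):
--         return True
--     if o4 == 0 and on_segment(p2, q1, q2):
--         return True
--     return False
--
-- def is_disjoint(segments):
--     for s1, s2 in combinations(segments, 2):
--         if is_intersecting(s1[0], s1[1], s2[0], s2[1]):
--             return False
--     return True
--
-- def max_non_overlapping_segments(segments):
--     n = len(segments)
--     max_count = 0
--
--     # 모든 조합을 생성
--     for r in range(1, n + 1):
--         all_combinations = combinations(segments, r)
--         for combination in all_combinations:
--             if is_disjoint(combination):
--                 max_count = max(max_count, len(combination))
--
--     return max_count
-- ===== SOURCE B (Python) =====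
-- def max_non_overlapping_segments(segments):
--     # Include/exclude DFS over the list: subsets containing a crossing pair are
--     # pruned at the first conflict instead of being enumerated and re-checked.
--     def orient(p, q, r):
--         v = (q[1] - p[1]) * (r[0] - q[0]) - (q[0] - p[0]) * (r[1] - q[1])
--         return 0 if v == 0 else (1 if v > 0 else -1)
--
--     def on_seg(p, q, r):
--         return min(p[0], r[0]) <= q[0] <= max(p[0], r[0]) and min(p[1], r[1]) <= q[1] <= max(p[1], r[1])
--
--     def crosses(s, t):
--         p1, q1 = s
--         p2, q2 = t
--         o1 = orient(p1, q1, p2)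
--         o2 = orient(p1, q1, q2)
--         o3 = orient(p2, q2, p1)
--         o4 = orient(p2, q2, q1)
--         if o1 != o2 and o3 != o4:
--             return True
--         if o1 == 0 and on_seg(p1, p2, q1):
--             return True
--         if o2 == 0 and on_seg(p1, q2, q1):
--             return True
--         if o3 == 0 and on_seg(p2, p1, q2):
--             return True
--         if o4 == 0 and on_seg(p2, q1, q2):
--             return True
--         return False
--
--     def best(rest, chosen):
--         if not rest:
--             return 0
--         s = rest[0]
--         tail = rest[1:]
--         skip = best(tail, chosen)
--         if all(not crosses(s, c) for c in chosen):
--             return max(skip, 1 + best(tail, [s] + chosen))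
--         return skip
--
--     return best(segments, [])
-- ===== Notes on version B (the rewrite author's own statement) =====
-- stated objective: alternative
-- what changed: A enumerates every combination of every size and re-runs the full pairwise intersection test on each; B does a single include/exclude DFS that extends a pairwise-compatible chosen set, so subsets containing a crossing pair are cut at their first conflict and each candidate is checked incrementally (measured much faster on conflict-heavy inputs, but both are exponential in the worst case).
import Mathlib
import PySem

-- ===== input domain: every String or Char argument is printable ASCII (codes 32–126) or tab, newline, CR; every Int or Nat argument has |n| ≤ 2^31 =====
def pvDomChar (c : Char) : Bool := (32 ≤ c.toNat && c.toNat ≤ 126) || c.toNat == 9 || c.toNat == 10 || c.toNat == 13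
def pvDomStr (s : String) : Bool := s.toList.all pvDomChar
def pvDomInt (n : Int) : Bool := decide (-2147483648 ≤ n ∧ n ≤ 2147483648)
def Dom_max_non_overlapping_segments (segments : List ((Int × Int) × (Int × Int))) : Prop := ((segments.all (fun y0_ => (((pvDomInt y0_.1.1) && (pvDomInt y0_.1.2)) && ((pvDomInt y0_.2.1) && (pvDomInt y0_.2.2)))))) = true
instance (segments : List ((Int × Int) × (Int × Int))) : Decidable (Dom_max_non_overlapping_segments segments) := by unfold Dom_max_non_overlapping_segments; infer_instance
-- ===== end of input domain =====

-- B replaces A's enumerate-all-combinations-and-recheck search by an include/exclude DFS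
-- that prunes at the first conflict; same return value on every input.

-- ===== PORT A =====
-- geometry helpers shared verbatim by both Pythons (identical code in Source A and Source B)
def pvOrient (p q r : Int × Int) : Int :=
  let v := (q.2 - p.2) * (r.1 - q.1) - (q.1 - p.1) * (r.2 - q.2)
  if v = 0 then 0 else if v > 0 then 1 else -1

def pvOnSeg (p q r : Int × Int) : Bool :=
  decide (min p.1 r.1 ≤ q.1 ∧ q.1 ≤ max p.1 r.1 ∧ min p.2 r.2 ≤ q.2 ∧ q.2 ≤ max p.2 r.2)

def pvInter (s t : (Int × Int) × (Int × Int)) : Bool :=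
  let p1 := s.1; let q1 := s.2; let p2 := t.1; let q2 := t.2
  let o1 := pvOrient p1 q1 p2
  let o2 := pvOrient p1 q1 q2
  let o3 := pvOrient p2 q2 p1
  let o4 := pvOrient p2 q2 q1
  if o1 ≠ o2 ∧ o3 ≠ o4 then true
  else if o1 = 0 ∧ pvOnSeg p1 p2 q1 then true
  else if o2 = 0 ∧ pvOnSeg p1 q2 q1 then true
  else if o3 = 0 ∧ pvOnSeg p2 p1 q2 then true
  else if o4 = 0 ∧ pvOnSeg p2 q1 q2 then true
  else false

-- is_disjoint: tests exactly the 2-element combinations of the tuple, same early exit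
def pvIsDisjoint : List ((Int × Int) × (Int × Int)) → Bool
  | [] => true
  | s :: rest => rest.all (fun t => !pvInter s t) && pvIsDisjoint rest

-- itertools.combinations(segments, r) is ported as Mathlib's List.sublistsLen r
def max_non_overlapping_segments (segments : List ((Int × Int) × (Int × Int))) : Int :=
  let n := segments.length
  (PySem.List.pyRange 1 ((n : Int) + 1) 1).foldl
    (fun acc r =>
      (List.sublistsLen r.toNat segments).foldl
        (fun a c => if pvIsDisjoint c then max a (c.length : Int) else a) acc)
    0

-- ===== PORT B =====
def pvBest : List ((Int × Int) × (Int × Int)) → List ((Int × Int) × (Int × Int)) → Int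
  | [], _ => 0
  | s :: tail, chosen =>
    let skip := pvBest tail chosen
    if chosen.all (fun c => !pvInter s c) then max skip (1 + pvBest tail (s :: chosen))
    else skip

def max_non_overlapping_segments_alt (segments : List ((Int × Int) × (Int × Int))) : Int :=
  pvBest segments []

-- ===== PRECONDITION & SPEC =====
def Spec_max_non_overlapping_segments (segments : List ((Int × Int) × (Int × Int))) (out : Int) : Prop := out = max_non_overlapping_segments_alt segments
instance (segments : List ((Int × Int) × (Int × Int))) (out : Int) : Decidable (Spec_max_non_overlapping_segments segments out) := by unfold Spec_max_non_overlapping_segments; infer_instance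

-- ===== CLAIM (what is proved, stated in full; the proofs are below) =====
def Claim_equal_max_non_overlapping_segments : Prop := ∀ (segments : List ((Int × Int) × (Int × Int))), Dom_max_non_overlapping_segments segments → Spec_max_non_overlapping_segments segments (max_non_overlapping_segments segments)

-- ===== LEMMAS AND PROOFS =====

-- a five-condition if-chain returning Bool is the decide of the disjunction
theorem pvIfChain5 (c1 c2 c3 c4 c5 : Prop) [Decidable c1] [Decidable c2] [Decidable c3]
    [Decidable c4] [Decidable c5] :
    (if c1 then true else if c2 then true else if c3 then true else if c4 then true
      else if c5 then true else false) = decide (c1 ∨ c2 ∨ c3 ∨ c4 ∨ c5) := by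
  split_ifs <;> simp_all

-- the intersection test is symmetric in the two segments
theorem pvInter_symm (s t : (Int × Int) × (Int × Int)) : pvInter s t = pvInter t s := by
  simp only [pvInter]
  rw [pvIfChain5, pvIfChain5, decide_eq_decide]
  constructor <;> (intro h; tauto)

-- a chosen-compatible, pairwise-compatible sublist
def pvGood (chosen T : List ((Int × Int) × (Int × Int))) : Prop :=
  T.Pairwise (fun a b => pvInter a b = false) ∧ ∀ t ∈ T, ∀ c ∈ chosen, pvInter t c = false

theorem pvIsDisjoint_iff (l : List ((Int × Int) × (Int × Int))) :
    pvIsDisjoint l = true ↔ l.Pairwise (fun a b => pvInter a b = false) := by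
  induction l with
  | nil => simp [pvIsDisjoint]
  | cons s rest ih =>
    simp [pvIsDisjoint, List.all_eq_true, List.pairwise_cons, ih, and_comm]

theorem pvBest_ge (l : List ((Int × Int) × (Int × Int))) :
    ∀ chosen T, T.Sublist l → pvGood chosen T → (T.length : Int) ≤ pvBest l chosen := by
  induction l with
  | nil =>
    intro chosen T hT _
    simp [List.sublist_nil.mp hT, pvBest]
  | cons s tail ih =>
    intro chosen T hT hG
    cases hT with
    | cons _ h =>
      have := ih chosen T h hG
      simp only [pvBest]
      split_ifs with hc
      · exact le_trans this (le_max_left _ _)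
      · exact this
    | cons₂ _ h =>
      rename_i T'
      obtain ⟨hpw, hcomp⟩ := hG
      rw [List.pairwise_cons] at hpw
      have hs : ∀ c ∈ chosen, pvInter s c = false := hcomp s (List.mem_cons_self ..)
      have hall : chosen.all (fun c => !pvInter s c) = true := by
        simp only [List.all_eq_true, Bool.not_eq_true']; exact hs
      have hG' : pvGood (s :: chosen) T' := by
        refine ⟨hpw.2, fun t ht c hc => ?_⟩
        rcases List.mem_cons.mp hc with rfl | hc
        · rw [pvInter_symm]; exact hpw.1 t ht
        · exact hcomp t (List.mem_cons_of_mem _ ht) c hc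
      have := ih (s :: chosen) T' h hG'
      simp only [pvBest, hall, if_pos]
      have : (T'.length : Int) + 1 ≤ 1 + pvBest tail (s :: chosen) := by omega
      calc ((s :: T').length : Int) = (T'.length : Int) + 1 := by simp
        _ ≤ 1 + pvBest tail (s :: chosen) := this
        _ ≤ max (pvBest tail chosen) (1 + pvBest tail (s :: chosen)) := le_max_right _ _

theorem pvBest_achieves (l : List ((Int × Int) × (Int × Int))) :
    ∀ chosen, ∃ T, T.Sublist l ∧ pvGood chosen T ∧ (T.length : Int) = pvBest l chosen := by
  induction l with
  | nil =>
    intro chosen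
    exact ⟨[], List.Sublist.refl _, ⟨List.Pairwise.nil, by simp⟩, by simp [pvBest]⟩
  | cons s tail ih =>
    intro chosen
    obtain ⟨Ts, hTs, hGs, hes⟩ := ih chosen
    by_cases hall : chosen.all (fun c => !pvInter s c) = true
    · obtain ⟨Tt, hTt, hGt, het⟩ := ih (s :: chosen)
      rcases le_total (1 + pvBest tail (s :: chosen)) (pvBest tail chosen) with hle | hle
      · refine ⟨Ts, hTs.cons _, hGs, ?_⟩
        simp only [pvBest, hall, if_pos]
        omega
      · refine ⟨s :: Tt, hTt.cons₂ _, ?_, ?_⟩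
        · obtain ⟨hpw, hcomp⟩ := hGt
          have hs : ∀ c ∈ chosen, pvInter s c = false := by
            intro c hc
            have := List.all_eq_true.mp hall c hc
            simpa [Bool.not_eq_true'] using this
          refine ⟨List.pairwise_cons.mpr ⟨fun t ht => ?_, hpw⟩, ?_⟩
          · rw [pvInter_symm]; exact hcomp t ht s (List.mem_cons_self ..)
          · intro t ht c hc
            rcases List.mem_cons.mp ht with rfl | ht
            · exact hs c hc
            · exact hcomp t ht c (List.mem_cons_of_mem _ hc)
        · simp only [pvBest, hall, if_pos]
          simp only [List.length_cons]
          omega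
    · refine ⟨Ts, hTs.cons _, hGs, ?_⟩
      simp only [pvBest, hall]
      exact hes

-- generic foldl lemmas for the max-accumulating folds of port A
theorem foldl_step_ge {α : Type} {f : Int → α → Int} (hf : ∀ a x, a ≤ f a x) :
    ∀ (xs : List α) (acc : Int), acc ≤ xs.foldl f acc := by
  intro xs
  induction xs with
  | nil => intro acc; simp
  | cons x xs ih => intro acc; exact le_trans (hf acc x) (ih (f acc x))

theorem foldl_mem_ge {α : Type} {f : Int → α → Int} (hf : ∀ a x, a ≤ f a x)
    {v : Int} {x : α} (hx : ∀ a, v ≤ f a x) :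
    ∀ (xs : List α) (acc : Int), x ∈ xs → v ≤ xs.foldl f acc := by
  intro xs
  induction xs with
  | nil => intro acc h; simp at h
  | cons y ys ih =>
    intro acc h
    rcases List.mem_cons.mp h with rfl | h
    · exact le_trans (hx acc) (foldl_step_ge hf ys _)
    · exact ih _ h

-- the inner fold of port A: its value is the start or the length of a disjoint combination
theorem inner_cases (cs : List (List ((Int × Int) × (Int × Int)))) :
    ∀ acc : Int,
      cs.foldl (fun a c => if pvIsDisjoint c then max a (c.length : Int) else a) acc = acc ∨
      ∃ c ∈ cs, pvIsDisjoint c = true ∧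
        cs.foldl (fun a c => if pvIsDisjoint c then max a (c.length : Int) else a) acc = (c.length : Int) := by
  induction cs with
  | nil => intro acc; left; simp
  | cons c cs ih =>
    intro acc
    rcases ih (if pvIsDisjoint c then max acc (c.length : Int) else acc) with h | ⟨c', hc', hd', he'⟩
    · by_cases hd : pvIsDisjoint c = true
      · rcases max_choice acc (c.length : Int) with hm | hm
        · left; simp only [List.foldl_cons, hd, if_pos] at h ⊢; rw [h, hm]
        · right
          exact ⟨c, List.mem_cons_self .., hd, by simp only [List.foldl_cons, hd, if_pos] at h ⊢; rw [h, hm]⟩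
      · left; simp only [List.foldl_cons, hd] at h ⊢; exact h
    · right; exact ⟨c', List.mem_cons_of_mem _ hc', hd', he'⟩

theorem portA_cases (segments : List ((Int × Int) × (Int × Int))) :
    max_non_overlapping_segments segments = 0 ∨
    ∃ T, T.Sublist segments ∧ pvIsDisjoint T = true ∧
      max_non_overlapping_segments segments = (T.length : Int) := by
  simp only [max_non_overlapping_segments]
  generalize PySem.List.pyRange 1 ((segments.length : Int) + 1) 1 = rs
  have main : ∀ (rs : List Int) (acc : Int),
      rs.foldl (fun acc r => (List.sublistsLen r.toNat segments).foldl
        (fun a c => if pvIsDisjoint c then max a (c.length : Int) else a) acc) acc = acc ∨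
      ∃ T, T.Sublist segments ∧ pvIsDisjoint T = true ∧
        rs.foldl (fun acc r => (List.sublistsLen r.toNat segments).foldl
          (fun a c => if pvIsDisjoint c then max a (c.length : Int) else a) acc) acc = (T.length : Int) := by
    intro rs
    induction rs with
    | nil => intro acc; left; simp
    | cons r rs ih =>
      intro acc
      rcases ih ((List.sublistsLen r.toNat segments).foldl
          (fun a c => if pvIsDisjoint c then max a (c.length : Int) else a) acc) with h | ⟨T, hT, hd, he⟩
      · rcases inner_cases (List.sublistsLen r.toNat segments) acc with h2 | ⟨c, hc, hd, he⟩
        · left; simp only [List.foldl_cons] at h ⊢; rw [h, h2]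
        · right
          exact ⟨c, (List.mem_sublistsLen.mp hc).1, hd, by simp only [List.foldl_cons] at h ⊢; rw [h, he]⟩
      · right; exact ⟨T, hT, hd, by simpa using he⟩
  exact main rs 0

theorem portA_nonneg (segments : List ((Int × Int) × (Int × Int))) :
    0 ≤ max_non_overlapping_segments segments := by
  simp only [max_non_overlapping_segments]
  apply foldl_step_ge
  intro a r
  apply foldl_step_ge
  intro a' c
  split_ifs
  · exact le_max_left _ _
  · exact le_refl _

theorem portA_ge (segments : List ((Int × Int) × (Int × Int)))
    (T : List ((Int × Int) × (Int × Int))) (hT : T.Sublist segments) (hne : T ≠ [])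
    (hd : pvIsDisjoint T = true) :
    (T.length : Int) ≤ max_non_overlapping_segments segments := by
  simp only [max_non_overlapping_segments]
  have hlen : 1 ≤ T.length := by
    cases T with
    | nil => exact absurd rfl hne
    | cons a l => simp
  have hmem : (T.length : Int) ∈ PySem.List.pyRange 1 ((segments.length : Int) + 1) 1 := by
    rw [PySem.List.mem_pyRange_one]
    have := hT.length_le
    omega
  refine foldl_mem_ge ?_ ?_ _ 0 hmem
  · intro a r
    apply foldl_step_ge
    intro a' c
    split_ifs
    · exact le_max_left _ _
    · exact le_refl _
  · intro a
    have hTmem : T ∈ List.sublistsLen ((T.length : Int)).toNat segments := by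
      rw [Int.toNat_natCast]
      exact List.mem_sublistsLen.mpr ⟨hT, rfl⟩
    refine foldl_mem_ge ?_ ?_ _ a hTmem
    · intro a' c
      split_ifs
      · exact le_max_left _ _
      · exact le_refl _
    · intro a'
      simp [hd]

theorem portA_eq_pvBest (segments : List ((Int × Int) × (Int × Int))) :
    max_non_overlapping_segments segments = pvBest segments [] := by
  apply le_antisymm
  · rcases portA_cases segments with h | ⟨T, hT, hd, he⟩
    · rw [h]
      obtain ⟨T, _, _, he⟩ := pvBest_achieves segments []
      omega
    · rw [he]
      exact pvBest_ge segments [] T hT ⟨(pvIsDisjoint_iff T).mp hd, by simp⟩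
  · obtain ⟨T, hT, hG, he⟩ := pvBest_achieves segments []
    rw [← he]
    cases T with
    | nil => simpa using portA_nonneg segments
    | cons a l =>
      exact portA_ge segments (a :: l) hT (by simp) ((pvIsDisjoint_iff _).mpr hG.1)

-- ===== VERDICT (by name: the statement is the Claim_ definition above) =====
theorem max_non_overlapping_segments_spec : Claim_equal_max_non_overlapping_segments := by
  intro segments _
  unfold Spec_max_non_overlapping_segments max_non_overlapping_segments_alt
  exact portA_eq_pvBest segments
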